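-- pv_equiv track=rewrite | github.com/nitkannen/CONTRASTE | ASTE/utils.py | correct_spaces
-- ===== SOURCE A (Python) =====
-- def correct_spaces(result):
--
-- 	for i in range(len(result)):
-- 		s = ''
-- 		prev = ''
-- 		for char in result[i]:
-- 			if char == '<':
-- 				s += ' ' + char
-- 			elif char == "'":
-- 				if prev == 'n':
-- 					s = s[:-1] + ' ' + prev + char
-- 				else:
-- 					s += ' ' + char
-- 			else:
-- 				s += char
--
-- 			prev = char
--
-- 		result[i] = s
--
-- 	return result
-- ===== SOURCE B (Python) =====
-- def correct_spaces(result):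
--     # Single pass with one-char lookahead: consume "n'" as one token, else prepend
--     # a space to ' or <; builds a token list joined once (mutates result in place like A).
--     for i in range(len(result)):
--         s = result[i]
--         out = []
--         j = 0
--         n = len(s)
--         while j < n:
--             c = s[j]
--             if c == 'n' and j + 1 < n and s[j + 1] == "'":
--                 out.append(" n'")
--                 j += 2
--             elif c == "'" or c == '<':
--                 out.append(' ' + c)
--                 j += 1
--             else:
--                 out.append(c)
--                 j += 1
--         result[i] = ''.join(out)
--     return result
-- ===== Notes on version B (the rewrite author's own statement) =====
-- stated objective: alternative
-- what changed: Replaces A's stateful prev-tracking loop with its s[:-1] string splice by a one-char-lookahead tokenizer that consumes "n'" as a single token and joins a token list once, so no already-built output is ever rewritten.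
import Mathlib
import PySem

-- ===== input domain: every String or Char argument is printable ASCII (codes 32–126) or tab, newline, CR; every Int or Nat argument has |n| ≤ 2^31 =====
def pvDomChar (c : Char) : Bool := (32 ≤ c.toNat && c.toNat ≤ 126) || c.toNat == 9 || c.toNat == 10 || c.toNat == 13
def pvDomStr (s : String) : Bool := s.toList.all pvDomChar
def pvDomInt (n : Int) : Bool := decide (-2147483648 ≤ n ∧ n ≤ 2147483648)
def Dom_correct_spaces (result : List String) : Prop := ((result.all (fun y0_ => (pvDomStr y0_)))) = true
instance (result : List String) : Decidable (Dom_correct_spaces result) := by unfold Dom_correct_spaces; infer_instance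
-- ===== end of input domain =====

-- B replaces A's prev-tracking loop (with its s[:-1] splice) by a one-char-lookahead
-- tokenizer consuming "n'" as a unit (alternative decomposition, same cost).
-- Both A and B mutate the argument list in place; the equivalence proved is about the return value.


-- ===== PORT A =====
-- one step of A's inner character loop; state = (s, prev) as lists of chars
-- (Python s[:-1] on a string is exactly List.dropLast of its chars).
def csA_step (acc : List Char × List Char) (c : Char) : List Char × List Char :=
  let s := acc.1
  let prev := acc.2
  let s' :=
    if c = '<' then s ++ [' ', c]
    else if c = '\'' then
      if prev = ['n'] then s.dropLast ++ [' '] ++ prev ++ [c]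
      else s ++ [' ', c]
    else s ++ [c]
  (s', [c])

def correct_spaces (result : List String) : List String :=
  result.map (fun r => String.ofList (r.toList.foldl csA_step ([], [])).1)

-- ===== PORT B =====
-- B's while loop with index j and lookahead s[j+1], as structural recursion
-- consuming one or two chars per step.
def csB_scan : List Char → List Char
  | [] => []
  | 'n' :: '\'' :: rest => ' ' :: 'n' :: '\'' :: csB_scan rest
  | '\'' :: rest => ' ' :: '\'' :: csB_scan rest
  | '<' :: rest => ' ' :: '<' :: csB_scan rest
  | c :: rest => c :: csB_scan rest

def correct_spaces_alt (result : List String) : List String :=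
  result.map (fun r => String.ofList (csB_scan r.toList))

-- ===== PRECONDITION & SPEC =====
def Spec_correct_spaces (result : List String) (out : List String) : Prop := out = correct_spaces_alt result
instance (result : List String) (out : List String) : Decidable (Spec_correct_spaces result out) := by unfold Spec_correct_spaces; infer_instance

-- ===== CLAIM (what is proved, stated in full; the proofs are below) =====
def Claim_equal_correct_spaces : Prop := ∀ (result : List String), Dom_correct_spaces result → Spec_correct_spaces result (correct_spaces result)

-- ===== LEMMAS AND PROOFS =====
-- Loop invariant: from any state (s, p) whose prev is not ['n'] — or whose
-- remaining input does not start with a quote — A's fold appends B's scan.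
theorem csA_key (cs : List Char) : ∀ (s p : List Char),
    (p = ['n'] → cs.head? ≠ some '\'') →
    (cs.foldl csA_step (s, p)).1 = s ++ csB_scan cs := by
  induction cs using csB_scan.induct with
  | case1 => intro s p _; simp [csB_scan]
  | case2 rest ih =>
      intro s p _
      simp only [List.foldl, csA_step, csB_scan]
      rw [ih]
      · simp
      · simp
  | case3 rest ih =>
      intro s p hp
      have hpn : p ≠ ['n'] := fun h => (hp h) rfl
      simp only [List.foldl, csA_step, csB_scan]
      rw [ih]
      · simp [hpn]
      · simp
  | case4 rest ih =>
      intro s p _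
      simp only [List.foldl, csA_step, csB_scan]
      rw [ih]
      · simp
      · simp
  | case5 c rest h1 h2 h3 ih =>
      intro s p _
      have hscan : csB_scan (c :: rest) = c :: csB_scan rest := by
        rw [csB_scan.eq_def]
        split
        · simp_all
        · simp_all
        · simp_all
        · simp_all
        · simp_all
      have hc1 : c ≠ '<' := fun h => h3 h
      have hc2 : c ≠ '\'' := fun h => h2 h
      simp only [List.foldl, csA_step, hc1, hc2, if_false, hscan]
      rw [ih]
      · simp
      · intro hcn
        injection hcn with hcn _
        subst hcn
        cases rest with
        | nil => simp
        | cons d tl =>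
          simp only [List.head?, ne_eq, Option.some.injEq]
          intro hd; exact h1 tl rfl (by rw [hd])

-- ===== VERDICT (by name: the statement is the Claim_ definition above) =====
theorem correct_spaces_spec : Claim_equal_correct_spaces := by
  intro result _
  unfold Spec_correct_spaces correct_spaces correct_spaces_alt
  refine List.map_congr_left (fun r _ => ?_)
  rw [csA_key r.toList [] [] (by simp), List.nil_append]
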